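-- pv_equiv track=rewrite | github.com/alexandraback/datacollection | solutions_5738606668808192_1/Python/wooshmi/c.py | compute
-- ===== SOURCE A (Python) =====
-- def compute(x, base):
--     aux = 0;
--     mult = 1;
--     while x:
--         aux += mult * (x & 1)
--         x >>= 1
--         mult *= base
--     return aux
-- ===== SOURCE B (Python) =====
-- def compute(x, base):
--     bits = [1 if c == '1' else 0 for c in reversed(bin(x)[2:])]
--     return sum(b * base ** i for i, b in enumerate(bits))
-- ===== Notes on version B (the rewrite author's own statement) =====
-- stated objective: alternative
-- what changed: Replaces A's single while-loop over the integer with a running power accumulator by two staged passes: first materialise the LSB-first bit list from bin(x)[2:], then sum b*base**i over enumerate of that list.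
import Mathlib
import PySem

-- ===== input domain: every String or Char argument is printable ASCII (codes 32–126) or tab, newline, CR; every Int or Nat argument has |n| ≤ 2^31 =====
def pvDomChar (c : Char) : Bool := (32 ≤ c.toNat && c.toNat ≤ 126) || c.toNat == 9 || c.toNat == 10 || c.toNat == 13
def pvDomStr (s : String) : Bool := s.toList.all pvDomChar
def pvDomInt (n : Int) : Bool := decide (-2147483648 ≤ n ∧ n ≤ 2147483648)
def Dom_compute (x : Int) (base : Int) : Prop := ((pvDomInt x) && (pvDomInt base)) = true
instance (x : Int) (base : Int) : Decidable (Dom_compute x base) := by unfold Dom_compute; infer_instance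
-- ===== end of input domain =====

-- B builds the bit list of x in a first pass and then sums b*base^i over enumerate
-- (explicit powers), instead of A's single loop carrying a running power. Return values only.

-- ===== PORT A =====
-- A's while loop; the `0 < x` guard only makes the loop total (Python's `while x` with
-- x >>= 1 never terminates for negative x, which Pre_compute excludes).
def computeLoop (x aux mult base : Int) : Int :=
  if _h : 0 < x then
    computeLoop (x >>> (1 : Nat)) (aux + mult * (PySem.Int.band x 1)) (mult * base) base
  else aux
termination_by x.natAbs
decreasing_by
  have : x >>> (1 : Nat) = x / 2 := by
    simpa using Int.shiftRight_eq_div_pow x 1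
  rw [this]; omega

def compute (x : Int) (base : Int) : Int := computeLoop x 0 1 base

-- ===== PORT B =====
-- bin(n) for n : Nat, without the '0b' prefix (bin(x)[2:]); exact for x ≥ 0 (Pre_compute).
def binDigits (n : Nat) : List Char :=
  if n = 0 then [] else binDigits (n / 2) ++ [if n % 2 = 1 then '1' else '0']

-- Source B: bits = [1 if c == '1' else 0 for c in reversed(bin(x)[2:])]
def bitList (x : Int) : List Int :=
  ((if x = 0 then ['0'] else binDigits x.toNat).reverse).map
    (fun c => if c = '1' then (1 : Int) else 0)

-- Source B: sum(b * base ** i for i, b in enumerate(bits))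
def compute_alt (x : Int) (base : Int) : Int :=
  ((PySem.List.enumerate (bitList x)).map (fun p => p.2 * base ^ p.1.toNat)).sum

-- ===== PRECONDITION & SPEC =====
-- Pre_ excludes negative x: there Python's A loops forever (x >>= 1 stays negative).
def Pre_compute (x : Int) (base : Int) : Prop := 0 ≤ x
instance (x : Int) (base : Int) : Decidable (Pre_compute x base) := by unfold Pre_compute; infer_instance
def pvWitness_compute : Int × Int := (5, 3)

def Spec_compute (x : Int) (base : Int) (out : Int) : Prop := out = compute_alt x base
instance (x : Int) (base : Int) (out : Int) : Decidable (Spec_compute x base out) := by unfold Spec_compute; infer_instance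

-- ===== CLAIM (what is proved, stated in full; the proofs are below) =====
def Claim_equal_compute : Prop := ∀ (x : Int) (base : Int), Dom_compute x base → Pre_compute x base → Spec_compute x base (compute x base)

-- ===== LEMMAS AND PROOFS =====

-- LSB-first bits of n, the common reference both ports are reduced to.
def lsb (n : Nat) : List Int :=
  if n = 0 then [] else ((n % 2 : Nat) : Int) :: lsb (n / 2)

-- A's loop computes aux + mult * Horner(lsb x) .
theorem loop_eq_horner (base : Int) : ∀ (n : Nat) (x : Int), x.natAbs = n → 0 ≤ x →
    ∀ (aux mult : Int),
      computeLoop x aux mult base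
        = aux + mult * (lsb x.toNat).foldr (fun b r => b + base * r) 0 := by
  intro n
  induction n using Nat.strong_induction_on with
  | _ n ih =>
    intro x hn hx aux mult
    rw [computeLoop]
    by_cases h : 0 < x
    · simp only [h, dif_pos]
      have hdiv : x >>> (1 : Nat) = x / 2 := by
        simpa using Int.shiftRight_eq_div_pow x 1
      have hlt : (x >>> (1 : Nat)).natAbs < n := by rw [hdiv]; omega
      have h2 : 0 ≤ x >>> (1 : Nat) := by rw [hdiv]; omega
      rw [ih _ hlt _ rfl h2]
      have hland : PySem.Int.band x 1 = ((x.toNat % 2 : Nat) : Int) := by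
        rw [PySem.Int.band_one]
        have : PySem.Int.mod x 2 = x % 2 := by
          simp [PySem.Int.mod, Int.fmod_eq_emod]
        rw [this]; omega
      have htl : (x >>> (1 : Nat)).toNat = x.toNat / 2 := by
        rw [hdiv]; omega
      have hne : x.toNat ≠ 0 := by omega
      rw [show lsb x.toNat = ((x.toNat % 2 : Nat) : Int) :: lsb (x.toNat / 2) from by
        rw [lsb]; simp [hne]]
      simp only [List.foldr_cons, hland, htl]
      ring
    · simp only [h]
      have : x = 0 := by omega
      subst this
      rw [lsb]; simp

-- reversed(bin(n)) mapped to 0/1 integers is lsb n.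
theorem binDigits_reverse_map (n : Nat) :
    ((binDigits n).reverse).map (fun c => if c = '1' then (1 : Int) else 0) = lsb n := by
  induction n using Nat.strong_induction_on with
  | _ n ih =>
    rw [binDigits, lsb]
    by_cases h : n = 0
    · simp [h]
    · simp only [h, if_false, List.reverse_append, List.reverse_cons, List.reverse_nil,
        List.nil_append, List.cons_append, List.map_cons]
      rw [ih (n / 2) (Nat.div_lt_self (Nat.pos_of_ne_zero h) one_lt_two)]
      congr 1
      by_cases h2 : n % 2 = 1
      · simp [h2]
      · have : n % 2 = 0 := by omega
        simp [this]

-- The enumerate/power sum equals the Horner value (generalised over the start index).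
theorem sum_enumerate_pow (base : Int) (l : List Int) : ∀ (s : Int), 0 ≤ s →
    ((PySem.List.enumerate l s).map (fun p => p.2 * base ^ p.1.toNat)).sum
      = base ^ s.toNat * l.foldr (fun b r => b + base * r) 0 := by
  induction l with
  | nil => intro s _; simp [PySem.List.enumerate_nil]
  | cons b t ih =>
    intro s hs
    rw [PySem.List.enumerate_cons]
    simp only [List.map_cons, List.sum_cons, List.foldr_cons]
    rw [ih (s + 1) (by omega)]
    have : (s + 1).toNat = s.toNat + 1 := by omega
    rw [this, pow_succ]
    ring

-- ===== VERDICT (by name: the statement is the Claim_ definition above) =====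
theorem compute_spec : Claim_equal_compute := by
  intro x base _ hpre
  unfold Spec_compute compute compute_alt bitList
  rw [sum_enumerate_pow base _ 0 le_rfl]
  simp only [Int.toNat_zero, pow_zero, one_mul]
  by_cases h0 : x = 0
  · subst h0
    rw [computeLoop]
    simp
  · rw [if_neg h0, binDigits_reverse_map]
    rw [loop_eq_horner base x.natAbs x rfl hpre 0 1]
    ring
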